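-- pv_equiv track=rewrite | github.com/mackenziekarkheck-hash/Apex-Music-Engine | apex_engine/src/agents/lyrical/agent_flow.py | _count_syllables_heuristic
-- ===== SOURCE A (Python) =====
-- def _count_syllables_heuristic(word: str) -> int:
--     """Count syllables using vowel cluster heuristic."""
--     word = word.lower()
--     count = 0
--     prev_vowel = False
--
--     for char in word:
--         is_vowel = char in 'aeiouy'
--         if is_vowel and not prev_vowel:
--             count += 1
--         prev_vowel = is_vowel
--
--     if word.endswith('e') and count > 1:
--         count -= 1
--
--     return max(1, count)
-- ===== SOURCE B (Python) =====
-- def _count_syllables_heuristic(word: str) -> int: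
--     """Count syllables by masking consonants to spaces and counting the
--     whitespace-split tokens (each token is one vowel cluster)."""
--     w = word.lower()
--     masked = ''.join(c if c in 'aeiouy' else ' ' for c in w)
--     count = len(masked.split())
--     if w.endswith('e') and count > 1:
--         count -= 1
--     return max(1, count)
-- ===== Notes on version B (the rewrite author's own statement) =====
-- stated objective: alternative
-- what changed: Replaces A's per-character prev_vowel state machine with staged tokenisation: mask every consonant to a space and count the whitespace-split tokens (each token is one maximal vowel cluster), then the same end-e/floor tail.
import Mathlib
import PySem

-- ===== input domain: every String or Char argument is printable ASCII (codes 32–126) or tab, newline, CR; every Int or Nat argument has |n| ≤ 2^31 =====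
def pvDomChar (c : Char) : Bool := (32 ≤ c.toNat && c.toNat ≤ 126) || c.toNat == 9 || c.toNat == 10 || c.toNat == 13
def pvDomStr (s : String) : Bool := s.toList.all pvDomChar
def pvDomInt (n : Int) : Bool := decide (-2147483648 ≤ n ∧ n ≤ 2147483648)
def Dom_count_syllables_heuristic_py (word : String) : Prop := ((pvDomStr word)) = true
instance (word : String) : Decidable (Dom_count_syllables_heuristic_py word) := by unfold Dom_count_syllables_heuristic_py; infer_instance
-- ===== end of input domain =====

-- B replaces A's prev_vowel state machine by a staged tokenisation: mask consonants to
-- spaces and count whitespace-split tokens (same cost; alternative decomposition).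

-- 'c in "aeiouy"' for a single char: exact as PySem substring membership
def pvIsVowel (c : Char) : Bool := PySem.Chars.isIn [c] ['a', 'e', 'i', 'o', 'u', 'y']

-- ===== PORT A =====
def count_syllables_heuristic_py (word : String) : Int :=
  let w := PySem.Str.lower word
  let st := w.toList.foldl
    (fun (s : Int × Bool) c =>
      let isV := pvIsVowel c
      (if isV && !s.2 then s.1 + 1 else s.1, isV))
    ((0 : Int), false)
  let count := if PySem.Str.endswith w "e" && decide (st.1 > 1) then st.1 - 1 else st.1
  max 1 count

-- ===== PORT B =====
def count_syllables_heuristic_py_alt (word : String) : Int :=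
  let w := PySem.Str.lower word
  let masked := String.ofList (w.toList.map (fun c => if pvIsVowel c then c else ' '))
  let count : Int := ((PySem.Str.split₀ masked).length : Nat)
  let count := if PySem.Str.endswith w "e" && decide (count > 1) then count - 1 else count
  max 1 count

-- ===== PRECONDITION & SPEC =====
def Spec_count_syllables_heuristic_py (word : String) (out : Int) : Prop := out = count_syllables_heuristic_py_alt word
instance (word : String) (out : Int) : Decidable (Spec_count_syllables_heuristic_py word out) := by unfold Spec_count_syllables_heuristic_py; infer_instance

-- ===== CLAIM (what is proved, stated in full; the proofs are below) =====
def Claim_equal_count_syllables_heuristic_py : Prop := ∀ (word : String), Dom_count_syllables_heuristic_py word → Spec_count_syllables_heuristic_py word (count_syllables_heuristic_py word)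

-- ===== LEMMAS AND PROOFS =====

-- proof-only helper: number of rising edges into runs of chars satisfying p, given the
-- previous char's status
def pvEdges (p : Char → Bool) : List Char → Bool → Nat
  | [], _ => 0
  | c :: t, prev => (if p c && !prev then 1 else 0) + pvEdges p t (p c)

-- A's loop body, named for the proofs (definitionally equal to the port's lambda)
def pvStep (s : Int × Bool) (c : Char) : Int × Bool :=
  (if pvIsVowel c && !s.2 then s.1 + 1 else s.1, pvIsVowel c)

-- A's fold counts rising edges into vowel runs
theorem pv_fold_eq_edges (l : List Char) (n : Int) (prev : Bool) :
    (l.foldl pvStep (n, prev)).1 = n + pvEdges pvIsVowel l prev := by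
  induction l generalizing n prev with
  | nil => simp [pvEdges]
  | cons c t ih =>
    rw [List.foldl_cons,
      show pvStep (n, prev) c
          = (if pvIsVowel c && !prev then n + 1 else n, pvIsVowel c) from rfl]
    by_cases hc : pvIsVowel c = true <;> by_cases hp : prev = true <;>
      simp only [hc, hp, Bool.not_true, Bool.not_false, Bool.and_true, Bool.and_false,
        if_true, ih, pvEdges] <;> push_cast <;> ring

theorem pv_isVowel_mem (c : Char) :
    pvIsVowel c = true ↔ c ∈ ['a', 'e', 'i', 'o', 'u', 'y'] := by
  rw [pvIsVowel, PySem.Chars.isIn_iff_infix]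
  constructor
  · intro h
    simpa using h.sublist.subset (by simp)
  · intro h
    obtain ⟨s, t, hst⟩ := List.append_of_mem h
    exact ⟨s, t, by rw [hst]; simp⟩

-- isspace of a masked char tracks vowelhood
theorem pv_mask_isspace (c : Char) :
    (!PySem.Chars.isspace (if pvIsVowel c then c else ' ')) = pvIsVowel c := by
  by_cases h : pvIsVowel c = true
  · rw [if_pos h, h]
    have hm := (pv_isVowel_mem c).mp h
    simp at hm
    rcases hm with rfl | rfl | rfl | rfl | rfl | rfl <;> decide
  · have h0 : pvIsVowel c = false := by simpa using h
    rw [if_neg h, h0]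
    decide

-- split₀.go counts tokens as rising edges into non-space runs
theorem pv_go_length (s : List Char) (cur : List Char) (acc : List (List Char)) :
    (PySem.Chars.split₀.go s cur acc).length
      = acc.length + pvEdges (fun c => !PySem.Chars.isspace c) s (!cur.isEmpty)
        + (if cur.isEmpty then 0 else 1) := by
  induction s generalizing cur acc with
  | nil =>
    by_cases h : cur.isEmpty <;> simp [PySem.Chars.split₀.go, h, pvEdges]
  | cons c t ih =>
    by_cases hs : PySem.Chars.isspace c <;> by_cases h : cur.isEmpty = true <;>
      simp [PySem.Chars.split₀.go, hs, h, pvEdges, ih] <;> omega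

-- edges over the masked list are vowel edges over the original list
theorem pv_edges_mask (l : List Char) (prev : Bool) :
    pvEdges (fun c => !PySem.Chars.isspace c)
        (l.map (fun c => if pvIsVowel c then c else ' ')) prev
      = pvEdges pvIsVowel l prev := by
  induction l generalizing prev with
  | nil => rfl
  | cons c t ih => simp [pvEdges, pv_mask_isspace, ih]

-- ===== VERDICT (by name: the statement is the Claim_ definition above) =====
theorem count_syllables_heuristic_py_spec : Claim_equal_count_syllables_heuristic_py := by
  intro word _
  have hb : ((PySem.Str.split₀ (String.ofList ((PySem.Str.lower word).toList.map
        (fun c => if pvIsVowel c then c else ' ')))).length : Nat)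
      = pvEdges pvIsVowel (PySem.Str.lower word).toList false := by
    rw [PySem.Str.split₀]
    simp only [List.length_map, String.toList_ofList]
    rw [PySem.Chars.split₀, pv_go_length]
    simp [pv_edges_mask]
  simp only [Spec_count_syllables_heuristic_py, count_syllables_heuristic_py,
    count_syllables_heuristic_py_alt]
  rw [show (fun (s : Int × Bool) c =>
        let isV := pvIsVowel c
        (if isV && !s.2 then s.1 + 1 else s.1, isV)) = pvStep from rfl,
    pv_fold_eq_edges, hb]
  simp
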